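-- pv_equiv track=rewrite | github.com/Kaushan-Dutta/DSA_PROBLEMS | sum_of_prd.py | sum_prd
-- ===== SOURCE A (Python) =====
-- def sum_prd(array):
--     count = 0
--     value = 0
--     prev = 0
--     for i in array:
--         if (i == '1'):
--             value += prev + 1
--             prev += 1
--         else:
--             count += value
--             prev = 0
--             value = 0
--     count += value
--     return count
-- ===== SOURCE B (Python) =====
-- def sum_prd(array):
--     total = 0
--     i = 0
--     n = len(array)
--     while i < n:
--         if array[i] == '1':
--             j = i
--             while j < n and array[j] == '1':
--                 j += 1
--             L = j - i
--             total += L * (L + 1) // 2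
--             i = j
--         else:
--             i += 1
--     return total
-- ===== Notes on version B (the rewrite author's own statement) =====
-- stated objective: alternative
-- what changed: B scans for maximal runs of consecutive '1' and adds the closed-form triangular number L*(L+1)//2 per run, instead of A's per-element count/value/prev accumulation.
import Mathlib
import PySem

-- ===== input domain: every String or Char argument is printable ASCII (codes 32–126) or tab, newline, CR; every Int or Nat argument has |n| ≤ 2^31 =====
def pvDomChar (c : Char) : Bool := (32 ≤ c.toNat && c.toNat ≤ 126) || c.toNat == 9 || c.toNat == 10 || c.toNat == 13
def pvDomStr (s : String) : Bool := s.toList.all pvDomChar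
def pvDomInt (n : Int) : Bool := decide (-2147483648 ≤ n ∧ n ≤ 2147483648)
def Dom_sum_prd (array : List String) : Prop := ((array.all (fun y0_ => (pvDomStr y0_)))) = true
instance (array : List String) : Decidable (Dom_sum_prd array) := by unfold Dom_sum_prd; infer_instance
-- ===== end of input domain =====

-- B replaces A's per-element count/value/prev accumulation with run detection plus the
-- closed-form triangular number per run of '1's (alternative decomposition, same cost).


-- ===== PORT A =====
-- literal port: fold over the list with state (count, value, prev)
def sum_prd (array : List String) : Int :=
  let st := array.foldl
    (fun (st : Int × Int × Int) i =>
      if i = "1" then (st.1, st.2.1 + st.2.2 + 1, st.2.2 + 1)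
      else (st.1 + st.2.1, (0 : Int), (0 : Int)))
    ((0 : Int), (0 : Int), (0 : Int))
  st.1 + st.2.1

-- ===== PORT B =====
-- literal port of Source B: scan for a maximal run of "1" (the inner while = takeWhile),
-- add the triangular number of its length, continue after the run.
def sum_prd_alt : List String → Int
  | [] => 0
  | x :: xs =>
    if x = "1" then
      let run := xs.takeWhile (fun y => y = "1")
      let L : Nat := run.length + 1
      (↑(L * (L + 1) / 2) : Int) + sum_prd_alt (xs.dropWhile (fun y => y = "1"))
    else sum_prd_alt xs
termination_by xs => xs.length
decreasing_by
  · simpa using Nat.lt_succ_of_le (xs.length_dropWhile_le _)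
  · simp

-- ===== PRECONDITION & SPEC =====
def Spec_sum_prd (array : List String) (out : Int) : Prop := out = sum_prd_alt array
instance (array : List String) (out : Int) : Decidable (Spec_sum_prd array out) := by unfold Spec_sum_prd; infer_instance

-- ===== CLAIM (what is proved, stated in full; the proofs are below) =====
def Claim_equal_sum_prd : Prop := ∀ (array : List String), Dom_sum_prd array → Spec_sum_prd array (sum_prd array)

-- ===== LEMMAS AND PROOFS =====

def pvTri (n : Nat) : Nat := n * (n + 1) / 2

theorem pvTri_double (n : Nat) : 2 * pvTri n = n * (n + 1) := by
  unfold pvTri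
  exact Nat.two_mul_div_two_of_even (Nat.even_mul_succ_self n)

-- B unfolds one maximal run (trivial when the head is not "1").
theorem alt_run (xs : List String) :
    sum_prd_alt xs =
      (↑(pvTri (xs.takeWhile (fun y => y = "1")).length) : Int)
        + sum_prd_alt (xs.dropWhile (fun y => y = "1")) := by
  match xs with
  | [] => simp [sum_prd_alt, pvTri]
  | x :: xs =>
    by_cases hx : x = "1"
    · simp [sum_prd_alt, hx, List.takeWhile, List.dropWhile, pvTri]
    · simp [sum_prd_alt, hx, List.takeWhile, List.dropWhile, pvTri]

-- Invariant for A's fold: with prev = pn and 2*value = pn*(pn+1), the final answer is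
-- count + triangular of (pn + length of the leading run) + B on the rest.
theorem fold_invariant (xs : List String) :
    ∀ (c v : Int) (pn : Nat), 2 * v = (↑(pn * (pn + 1)) : Int) →
      (let st := xs.foldl
        (fun (st : Int × Int × Int) i =>
          if i = "1" then (st.1, st.2.1 + st.2.2 + 1, st.2.2 + 1)
          else (st.1 + st.2.1, (0 : Int), (0 : Int)))
        (c, v, (↑pn : Int))
       st.1 + st.2.1)
        = c + (↑(pvTri (pn + (xs.takeWhile (fun y => y = "1")).length)) : Int)
            + sum_prd_alt (xs.dropWhile (fun y => y = "1")) := by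
  induction xs with
  | nil =>
    intro c v pn h
    have hd := pvTri_double pn
    simp only [List.foldl, List.takeWhile, List.dropWhile, sum_prd_alt, Nat.add_zero]
    -- v = pvTri pn
    have : v = (↑(pvTri pn) : Int) := by
      have : (↑(pn * (pn + 1)) : Int) = (↑(2 * pvTri pn) : Int) := by rw [hd]
      omega
    simp [this]
  | cons x xs ih =>
    intro c v pn h
    by_cases hx : x = "1"
    · have h' : 2 * (v + (↑pn : Int) + 1) = (↑((pn + 1) * ((pn + 1) + 1)) : Int) := by
        push_cast at h ⊢
        linear_combination h
      have := ih c (v + (↑pn : Int) + 1) (pn + 1) h'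
      simp only [List.foldl, hx, if_pos rfl, List.takeWhile, List.dropWhile] at this ⊢
      simp only [hx, if_pos rfl, decide_true, List.length_cons]
      push_cast at this ⊢
      rw [this]
      ring_nf
    · have := ih (c + v) 0 0 (by norm_num)
      have hd := pvTri_double pn
      have hv : v = (↑(pvTri pn) : Int) := by
        have : (↑(pn * (pn + 1)) : Int) = (↑(2 * pvTri pn) : Int) := by rw [hd]
        omega
      simp only [List.foldl, if_neg hx, List.takeWhile, List.dropWhile, hx, decide_false,
        Bool.false_eq_true, if_false, Nat.cast_zero, Nat.zero_add, Nat.add_zero] at this ⊢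
      have hr : sum_prd_alt (x :: xs) = sum_prd_alt xs := by simp [sum_prd_alt, hx]
      rw [this, hr, alt_run xs, hv]
      simp only [List.length_nil, Nat.add_zero]
      ring

-- ===== VERDICT (by name: the statement is the Claim_ definition above) =====
theorem sum_prd_spec : Claim_equal_sum_prd := by
  intro array _
  unfold Spec_sum_prd sum_prd
  have := fold_invariant array 0 0 0 (by norm_num)
  simp only [Nat.cast_zero, Nat.zero_add] at this
  rw [this, alt_run array]
  simp [pvTri]
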